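-- pv_equiv track=rewrite | github.com/raeez/chiral-bar-cobar | compute/lib/genus2_sewing_amplitudes.py | colored_partition_dim
-- ===== SOURCE A (Python) =====
-- def colored_partition_dim(n: int, colors: int) -> int:
--     """Number of colored partitions of n with given number of colors."""
--     if n < 0:
--         return 0
--     if n == 0:
--         return 1
--     dims = [0] * (n + 1)
--     dims[0] = 1
--     for m in range(1, n + 1):
--         for _ in range(colors):
--             for j in range(m, n + 1):
--                 dims[j] += dims[j - m]
--     return dims[n]
-- ===== SOURCE B (Python) =====
-- def colored_partition_dim(n: int, colors: int) -> int:
--     """Number of colored partitions of n with given number of colors.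
--
--     Instead of applying the '1/(1-x^m)' prefix-sum pass once per color, multiply
--     the series by the full factor 1/(1-x^m)^colors in one weighted pass, with
--     negative-binomial weights C(t+colors-1, t) built incrementally.
--     """
--     if n < 0:
--         return 0
--     if n == 0:
--         return 1
--     if colors <= 0:
--         # no colors available: no nonempty colored partition exists
--         return 0
--     dims = [1] + [0] * n
--     for m in range(1, n + 1):
--         new = dims[:]          # t = 0 term (weight 1)
--         w = 1
--         t = 1
--         while t * m <= n:
--             w = w * (t + colors - 1) // t   # w = C(t+colors-1, t)
--             tm = t * m
--             for j in range(tm, n + 1):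
--                 new[j] += w * dims[j - tm]
--             t += 1
--         dims = new
--     return dims[n]
-- ===== Notes on version B (the rewrite author's own statement) =====
-- stated objective: faster
-- what changed: A applies the 1/(1-x^m) in-place prefix-sum pass once per color (colors nested passes per part size); B multiplies by the whole factor 1/(1-x^m)^colors in a single pass per part size, using incrementally computed negative-binomial weights C(t+colors-1,t), so the per-color loop disappears.
import Mathlib
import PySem

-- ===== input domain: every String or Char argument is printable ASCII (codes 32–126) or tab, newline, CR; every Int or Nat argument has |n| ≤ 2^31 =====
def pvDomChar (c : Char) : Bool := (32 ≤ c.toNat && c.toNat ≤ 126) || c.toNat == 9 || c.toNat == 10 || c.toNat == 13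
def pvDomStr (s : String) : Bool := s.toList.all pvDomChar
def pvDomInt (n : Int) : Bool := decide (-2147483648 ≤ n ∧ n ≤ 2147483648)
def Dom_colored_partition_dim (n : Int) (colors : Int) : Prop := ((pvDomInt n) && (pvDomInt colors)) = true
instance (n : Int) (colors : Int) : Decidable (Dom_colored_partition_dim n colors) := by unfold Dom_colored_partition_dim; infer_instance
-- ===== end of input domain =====

-- B replaces A's per-color repetition of the 1/(1-x^m) prefix-sum pass by ONE weighted
-- pass per part size m with negative-binomial weights C(t+colors-1,t) (objective: faster
-- for large `colors`; the colors-fold disappears from the inner loops).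

-- ===== PORT A =====
-- inner loop 'for j in range(m, n+1): dims[j] += dims[j-m]' (in-place, ascending j)
def pvPassA (m : Nat) (d : List Int) : List Int :=
  (List.range' m (d.length - m)).foldl
    (fun a j => a.set j (a.getD j 0 + a.getD (j - m) 0)) d

def colored_partition_dim (n : Int) (colors : Int) : Int :=
  if n < 0 then 0
  else if n = 0 then 1
  else
    let N := n.toNat
    let dims0 := (List.replicate (N + 1) (0 : Int)).set 0 1
    -- for m in range(1, n+1): for _ in range(colors): <inner pass>
    let dims := (List.range' 1 N).foldl
      (fun d m => (List.range colors.toNat).foldl (fun d' _ => pvPassA m d') d) dims0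
    dims.getD N 0

-- ===== PORT B =====
-- inner loop 'for j in range(tm, n+1): new[j] += w * dims[j - tm]'
def pvPassBInner (w : Int) (tm : Nat) (dims acc : List Int) : List Int :=
  (List.range' tm (acc.length - tm)).foldl
    (fun a j => a.set j (a.getD j 0 + w * dims.getD (j - tm) 0)) acc

-- one iteration of the 'while t*m <= n' body of Source B, on the state (new, w)
def pvPassBStep (colors : Int) (m : Nat) (dims : List Int) (st : List Int × Int) (t : Nat) : List Int × Int :=
  let w := PySem.Int.floordiv (st.2 * ((t : Int) + colors - 1)) (t : Int)
  (pvPassBInner w (t * m) dims st.1, w)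

-- the 'while t*m <= n' loop of Source B; since t starts at 1 and increases by 1, the
-- iterations are exactly t = 1, …, n // m, so it is ported as a fold over that range,
-- carrying the state (new, w)
def pvPassB (colors : Int) (N m : Nat) (dims : List Int) : List Int :=
  ((List.range' 1 (N / m)).foldl (pvPassBStep colors m dims) (dims, 1)).1

def colored_partition_dim_alt (n : Int) (colors : Int) : Int :=
  if n < 0 then 0
  else if n = 0 then 1
  else if colors ≤ 0 then 0
  else
    let N := n.toNat
    let dims0 := (1 : Int) :: List.replicate N 0
    let dims := (List.range' 1 N).foldl (fun d m => pvPassB colors N m d) dims0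
    dims.getD N 0

-- ===== PRECONDITION & SPEC =====
def Spec_colored_partition_dim (n : Int) (colors : Int) (out : Int) : Prop := out = colored_partition_dim_alt n colors
instance (n : Int) (colors : Int) (out : Int) : Decidable (Spec_colored_partition_dim n colors out) := by unfold Spec_colored_partition_dim; infer_instance

-- ===== CLAIM (what is proved, stated in full; the proofs are below) =====
def Claim_equal_colored_partition_dim : Prop := ∀ (n : Int) (colors : Int), Dom_colored_partition_dim n colors → Spec_colored_partition_dim n colors (colored_partition_dim n colors)

-- ===== LEMMAS AND PROOFS =====

-- value of entry k as a function of the index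
def pvF (l : List Int) : Nat → Int := fun k => l.getD k 0

-- result of one in-place ascending pass of A: entry k = sum of entries k, k-m, k-2m, …
def pvSS (m : Nat) (f : Nat → Int) (k : Nat) : Int :=
  ∑ t ∈ Finset.range (k / m + 1), f (k - t * m)

-- result of c passes: negative-binomial weighted sums (coefficients of 1/(1-x^m)^c)
def pvWS (c m : Nat) (f : Nat → Int) (k : Nat) : Int :=
  ∑ t ∈ Finset.range (k / m + 1), ((t + c - 1).choose t : Int) * f (k - t * m)

-- B's partial version after the first T iterations of the while loop
def pvWSp (c m T : Nat) (f : Nat → Int) (k : Nat) : Int :=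
  ∑ t ∈ Finset.range (min (k / m) T + 1), ((t + c - 1).choose t : Int) * f (k - t * m)

-- getD after set, total in the index
lemma pvGetD_set_self {l : List Int} {i : Nat} {a : Int} (h : i < l.length) :
    (l.set i a).getD i 0 = a := by
  rw [List.getD_eq_getElem _ _ (by simpa using h)]
  exact List.getElem_set_self _

lemma pvGetD_set_ne {l : List Int} {i k : Nat} {a : Int} (h : k ≠ i) :
    (l.set i a).getD k 0 = l.getD k 0 := by
  by_cases hk : k < l.length
  · rw [List.getD_eq_getElem _ _ (by simpa using hk), List.getD_eq_getElem _ _ hk]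
    exact List.getElem_set_ne (fun he => h he.symm) _
  · rw [List.getD_eq_default _ _ (by simpa using Nat.le_of_not_lt hk),
        List.getD_eq_default _ _ (Nat.le_of_not_lt hk)]

lemma pvSS_lt {m k : Nat} (f : Nat → Int) (h : k < m) : pvSS m f k = f k := by
  simp [pvSS, Nat.div_eq_of_lt h]

lemma pvSS_rec {m k : Nat} (f : Nat → Int) (hm : 1 ≤ m) (h : m ≤ k) :
    pvSS m f k = f k + pvSS m f (k - m) := by
  have hsub : ∀ t : Nat, k - (t + 1) * m = k - m - t * m := by
    intro t; rw [Nat.succ_mul]; omega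
  rw [pvSS, Nat.div_eq_sub_div (by omega) h, Finset.sum_range_succ']
  rw [pvSS]
  have : ∀ t ∈ Finset.range ((k - m) / m + 1), f (k - (t + 1) * m) = f (k - m - t * m) := by
    intro t _; rw [hsub]
  rw [Finset.sum_congr rfl this]
  simp [add_comm]

lemma pvSS_congr {m k : Nat} {f g : Nat → Int} (h : ∀ i, i ≤ k → f i = g i) :
    pvSS m f k = pvSS m g k := by
  refine Finset.sum_congr rfl fun t _ => ?_
  exact h _ (Nat.sub_le _ _)

lemma pvWS_zero {m k : Nat} (f : Nat → Int) : pvWS 0 m f k = f k := by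
  rw [pvWS, Finset.sum_range_succ']
  have : ∀ t ∈ Finset.range (k / m), ((t + 1 + 0 - 1).choose (t + 1) : Int) * f (k - (t + 1) * m) = 0 := by
    intro t _
    simp
  rw [Finset.sum_congr rfl this]
  simp

lemma pvWS_lt {c m k : Nat} (f : Nat → Int) (h : k < m) : pvWS c m f k = f k := by
  simp [pvWS, Nat.div_eq_of_lt h]

lemma pvWS_pascal {c m k : Nat} (f : Nat → Int) (hm : 1 ≤ m) :
    pvWS (c + 1) m f k = pvWS c m f k + (if m ≤ k then pvWS (c + 1) m f (k - m) else 0) := by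
  by_cases hk : m ≤ k
  · have hsub : ∀ t : Nat, k - (t + 1) * m = k - m - t * m := by
      intro t; rw [Nat.succ_mul]; omega
    have hdiv : k / m = (k - m) / m + 1 := Nat.div_eq_sub_div (by omega) hk
    have hL : ∀ t ∈ Finset.range ((k - m) / m + 1),
        ((t + 1 + (c + 1) - 1).choose (t + 1) : Int) * f (k - (t + 1) * m)
          = ((t + c).choose t : Int) * f (k - m - t * m)
            + ((t + c).choose (t + 1) : Int) * f (k - m - t * m) := by
      intro t _
      have he : t + 1 + (c + 1) - 1 = (t + c) + 1 := by omega
      rw [he, Nat.choose_succ_succ, hsub]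
      push_cast
      ring
    have hR : ∀ t ∈ Finset.range ((k - m) / m + 1),
        ((t + 1 + c - 1).choose (t + 1) : Int) * f (k - (t + 1) * m)
          = ((t + c).choose (t + 1) : Int) * f (k - m - t * m) := by
      intro t _
      have he : t + 1 + c - 1 = t + c := by omega
      rw [he, hsub]
    have eL : pvWS (c + 1) m f k
        = (∑ t ∈ Finset.range ((k - m) / m + 1), ((t + c).choose t : Int) * f (k - m - t * m))
          + (∑ t ∈ Finset.range ((k - m) / m + 1), ((t + c).choose (t + 1) : Int) * f (k - m - t * m))
          + f k := by
      rw [pvWS, hdiv, Finset.sum_range_succ', Finset.sum_congr rfl hL, Finset.sum_add_distrib]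
      simp
    have eR1 : pvWS c m f k
        = (∑ t ∈ Finset.range ((k - m) / m + 1), ((t + c).choose (t + 1) : Int) * f (k - m - t * m))
          + f k := by
      rw [pvWS, hdiv, Finset.sum_range_succ', Finset.sum_congr rfl hR]
      simp
    have eR2 : pvWS (c + 1) m f (k - m)
        = ∑ t ∈ Finset.range ((k - m) / m + 1), ((t + c).choose t : Int) * f (k - m - t * m) := by
      rw [pvWS]
      refine Finset.sum_congr rfl fun t _ => ?_
      have he : t + (c + 1) - 1 = t + c := by omega
      rw [he]
    rw [if_pos hk, eL, eR1, eR2]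
    ring
  · rw [if_neg hk, pvWS_lt f (by omega), pvWS_lt f (by omega)]
    ring

lemma pvSS_pvWS {c m : Nat} (f : Nat → Int) (hm : 1 ≤ m) (k : Nat) :
    pvSS m (pvWS c m f) k = pvWS (c + 1) m f k := by
  induction k using Nat.strong_induction_on with
  | _ k ih =>
    by_cases hk : k < m
    · rw [pvSS_lt _ hk, pvWS_lt f hk, pvWS_lt f hk]
    · have hk' : m ≤ k := by omega
      rw [pvSS_rec _ hm hk', ih (k - m) (by omega),
          pvWS_pascal f hm (k := k), if_pos hk']

lemma pvWSp_full {c m T k : Nat} (f : Nat → Int) (h : k / m ≤ T) :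
    pvWSp c m T f k = pvWS c m f k := by
  rw [pvWSp, pvWS, Nat.min_eq_left h]

lemma pvWSp_zero {c m k : Nat} (f : Nat → Int) : pvWSp c m 0 f k = f k := by
  simp [pvWSp]

lemma pvWSp_succ {c m T k : Nat} (f : Nat → Int) (hm : 1 ≤ m) :
    pvWSp c m (T + 1) f k
      = pvWSp c m T f k
        + (if (T + 1) * m ≤ k then ((T + 1 + c - 1).choose (T + 1) : Int) * f (k - (T + 1) * m) else 0) := by
  by_cases hT : T + 1 ≤ k / m
  · have h1 : min (k / m) (T + 1) = T + 1 := Nat.min_eq_right hT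
    have h2 : min (k / m) T = T := Nat.min_eq_right (by omega)
    have hc : (T + 1) * m ≤ k := (Nat.le_div_iff_mul_le (by omega)).mp hT
    rw [pvWSp, pvWSp, h1, h2, Finset.sum_range_succ, if_pos hc]
  · have hkm : k / m ≤ T := by omega
    have h1 : min (k / m) (T + 1) = k / m := Nat.min_eq_left (by omega)
    have h2 : min (k / m) T = k / m := Nat.min_eq_left hkm
    have hc : ¬ (T + 1) * m ≤ k := by
      intro hle
      exact hT ((Nat.le_div_iff_mul_le (by omega)).mpr hle)
    rw [pvWSp, pvWSp, h1, h2, if_neg hc, add_zero]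

-- ---- A's inner pass, list level ----
lemma passA_foldl_spec (m : Nat) (hm : 1 ≤ m) :
    ∀ (i : Nat) (d : List Int), m + i ≤ d.length →
      ((List.range' m i).foldl (fun a j => a.set j (a.getD j 0 + a.getD (j - m) 0)) d).length = d.length
      ∧ ∀ k, ((List.range' m i).foldl (fun a j => a.set j (a.getD j 0 + a.getD (j - m) 0)) d).getD k 0
          = if k < m + i then pvSS m (pvF d) k else d.getD k 0 := by
  intro i
  induction i with
  | zero =>
    intro d _
    refine ⟨rfl, fun k => ?_⟩
    split_ifs with h
    · rw [pvSS_lt _ (by omega)]; rfl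
    · rfl
  | succ i ih =>
    intro d hlen
    have hlen' : m + i ≤ d.length := by omega
    obtain ⟨ihlen, ihget⟩ := ih d hlen'
    have hconcat : List.range' m (i + 1) = List.range' m i ++ [m + i] := by
      rw [List.range'_concat]; simp
    rw [hconcat, List.foldl_append, List.foldl_cons, List.foldl_nil]
    set r := (List.range' m i).foldl (fun a j => a.set j (a.getD j 0 + a.getD (j - m) 0)) d with hr
    have hv1 : r.getD (m + i) 0 = d.getD (m + i) 0 := by
      rw [ihget (m + i), if_neg (by omega)]
    have hv2 : r.getD (m + i - m) 0 = pvSS m (pvF d) i := by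
      have : m + i - m = i := by omega
      rw [this, ihget i, if_pos (by omega)]
    have hstep : pvSS m (pvF d) (m + i) = pvF d (m + i) + pvSS m (pvF d) i := by
      rw [pvSS_rec (pvF d) hm (k := m + i) (by omega)]
      have e : m + i - m = i := by omega
      rw [e]
    have hval : r.getD (m + i) 0 + r.getD (m + i - m) 0 = pvSS m (pvF d) (m + i) := by
      rw [hv1, hv2, hstep]; rfl
    refine ⟨by rw [List.length_set, ihlen], fun k => ?_⟩
    by_cases hk : k = m + i
    · subst hk
      rw [pvGetD_set_self (by rw [ihlen]; omega), hval, if_pos (by omega)]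
    · rw [pvGetD_set_ne hk, ihget k]
      split_ifs with h1 h2 h2
      · rfl
      · omega
      · omega
      · rfl

lemma pvPassA_spec {m : Nat} {d : List Int} (hm : 1 ≤ m) (hlen : m ≤ d.length) :
    (pvPassA m d).length = d.length
    ∧ ∀ k, k < d.length → (pvPassA m d).getD k 0 = pvSS m (pvF d) k := by
  obtain ⟨h1, h2⟩ := passA_foldl_spec m hm (d.length - m) d (by omega)
  refine ⟨h1, fun k hk => ?_⟩
  rw [pvPassA]
  rw [h2 k, if_pos (by omega)]

-- ---- A's middle (colors-fold) loop ----
lemma passA_iter_spec {m : Nat} (hm : 1 ≤ m) :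
    ∀ (c : Nat) (d : List Int), m ≤ d.length →
      ((List.range c).foldl (fun d' _ => pvPassA m d') d).length = d.length
      ∧ ∀ k, k < d.length →
          ((List.range c).foldl (fun d' _ => pvPassA m d') d).getD k 0 = pvWS c m (pvF d) k := by
  intro c
  induction c with
  | zero =>
    intro d _
    rw [List.range_zero, List.foldl_nil]
    exact ⟨rfl, fun k _ => by rw [pvWS_zero]; rfl⟩
  | succ c ih =>
    intro d hlenm
    obtain ⟨ih1, ih2⟩ := ih d hlenm
    rw [List.range_succ, List.foldl_append, List.foldl_cons, List.foldl_nil]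
    set rc := (List.range c).foldl (fun d' _ => pvPassA m d') d with hrc
    obtain ⟨p1, p2⟩ := pvPassA_spec hm (show m ≤ rc.length by rw [ih1]; exact hlenm)
    refine ⟨by rw [p1, ih1], fun k hk => ?_⟩
    rw [p2 k (by rw [ih1]; exact hk)]
    have hcg : pvSS m (pvF rc) k = pvSS m (pvWS c m (pvF d)) k :=
      pvSS_congr (fun i hi => ih2 i (by omega))
    rw [hcg, pvSS_pvWS (pvF d) hm]

-- ---- B's inner pass, list level ----
lemma passBInner_foldl_spec (w : Int) (dims : List Int) (s : Nat) :
    ∀ (i : Nat) (acc : List Int), s + i ≤ acc.length →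
      ((List.range' s i).foldl (fun a j => a.set j (a.getD j 0 + w * dims.getD (j - s) 0)) acc).length = acc.length
      ∧ ∀ k, ((List.range' s i).foldl (fun a j => a.set j (a.getD j 0 + w * dims.getD (j - s) 0)) acc).getD k 0
          = acc.getD k 0 + (if s ≤ k ∧ k < s + i then w * dims.getD (k - s) 0 else 0) := by
  intro i
  induction i with
  | zero =>
    intro acc _
    refine ⟨rfl, fun k => ?_⟩
    rw [if_neg (by omega), add_zero]
    rfl
  | succ i ih =>
    intro acc hlen
    have hlen' : s + i ≤ acc.length := by omega
    obtain ⟨ihlen, ihget⟩ := ih acc hlen'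
    have hconcat : List.range' s (i + 1) = List.range' s i ++ [s + i] := by
      rw [List.range'_concat]; simp
    rw [hconcat, List.foldl_append, List.foldl_cons, List.foldl_nil]
    set r := (List.range' s i).foldl (fun a j => a.set j (a.getD j 0 + w * dims.getD (j - s) 0)) acc with hr
    have hv1 : r.getD (s + i) 0 = acc.getD (s + i) 0 := by
      rw [ihget (s + i), if_neg (by omega), add_zero]
    refine ⟨by rw [List.length_set, ihlen], fun k => ?_⟩
    by_cases hk : k = s + i
    · subst hk
      rw [pvGetD_set_self (by rw [ihlen]; omega), hv1, if_pos (by omega)]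
    · rw [pvGetD_set_ne hk, ihget k]
      congr 1
      split_ifs with h1 h2 h2
      · rfl
      · omega
      · omega
      · rfl

lemma pvPassBInner_spec {w : Int} {s : Nat} {dims acc : List Int} (h : s ≤ acc.length) :
    (pvPassBInner w s dims acc).length = acc.length
    ∧ ∀ k, (pvPassBInner w s dims acc).getD k 0
        = acc.getD k 0 + (if s ≤ k ∧ k < acc.length then w * dims.getD (k - s) 0 else 0) := by
  obtain ⟨h1, h2⟩ := passBInner_foldl_spec w dims s (acc.length - s) acc (by omega)
  have e : s + (acc.length - s) = acc.length := by omega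
  rw [e] at h2
  exact ⟨h1, fun k => by rw [pvPassBInner, h2 k]⟩

-- ---- B's while loop ----
lemma passB_foldl_spec {colors : Int} {c m N : Nat} (hc : colors = (c : Int)) (hc1 : 1 ≤ c)
    (hm : 1 ≤ m) (d : List Int) (hlen : d.length = N + 1) :
    ∀ (T : Nat), T ≤ N / m →
      (((List.range' 1 T).foldl (pvPassBStep colors m d) (d, 1)).1.length = N + 1)
      ∧ (((List.range' 1 T).foldl (pvPassBStep colors m d) (d, 1)).2 = ((T + c - 1).choose T : Int))
      ∧ ∀ k, k < N + 1 →
          ((List.range' 1 T).foldl (pvPassBStep colors m d) (d, 1)).1.getD k 0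
            = pvWSp c m T (pvF d) k := by
  intro T
  induction T with
  | zero =>
    intro _
    rw [List.range'_zero, List.foldl_nil]
    refine ⟨hlen, by simp, fun k hk => ?_⟩
    rw [pvWSp_zero]
    rfl
  | succ T ih =>
    intro hT
    obtain ⟨ih1, ih2, ih3⟩ := ih (by omega)
    have he : 1 + 1 * T = T + 1 := by omega
    rw [List.range'_concat, he, List.foldl_append, List.foldl_cons, List.foldl_nil]
    set st := (List.range' 1 T).foldl (pvPassBStep colors m d) (d, 1) with hst
    have hsm : (T + 1) * m ≤ N := (Nat.le_div_iff_mul_le (by omega)).mp hT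
    have hw : PySem.Int.floordiv (st.2 * (((T + 1 : Nat) : Int) + colors - 1)) ((T + 1 : Nat) : Int)
        = ((T + 1 + c - 1).choose (T + 1) : Int) := by
      have hcast : (((T + 1 : Nat) : Int) + colors - 1) = ((T + c : Nat) : Int) := by
        rw [hc]; push_cast; ring
      have hmul : (T + c) * (T + c - 1).choose T = (T + c).choose (T + 1) * (T + 1) := by
        have h := Nat.add_one_mul_choose_eq (T + c - 1) T
        have e : T + c - 1 + 1 = T + c := by omega
        rwa [e] at h
      rw [ih2, hcast]
      have : ((T + c - 1).choose T : Int) * ((T + c : Nat) : Int)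
          = (((T + c).choose (T + 1) * (T + 1) : Nat) : Int) := by
        rw [← hmul]; push_cast; ring
      rw [this, PySem.Int.floordiv_natCast, Nat.mul_div_cancel _ (by omega)]
      have e2 : T + 1 + c - 1 = T + c := by omega
      rw [e2]
    obtain ⟨p1, p2⟩ := pvPassBInner_spec
      (w := ((T + 1 + c - 1).choose (T + 1) : Int)) (s := (T + 1) * m) (dims := d) (acc := st.1)
      (by rw [ih1]; omega)
    rw [pvPassBStep, hw]
    refine ⟨by rw [p1, ih1], hw ▸ rfl, fun k hk => ?_⟩
    rw [p2 k, ih3 k hk, pvWSp_succ (pvF d) hm, ih1]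
    congr 1
    by_cases hcond : (T + 1) * m ≤ k
    · rw [if_pos hcond, if_pos ⟨hcond, hk⟩]
      rfl
    · rw [if_neg hcond, if_neg (fun h => hcond h.1)]

lemma pvPassB_spec {colors : Int} {c m N : Nat} (hc : colors = (c : Int)) (hc1 : 1 ≤ c)
    (hm : 1 ≤ m) (d : List Int) (hlen : d.length = N + 1) :
    (pvPassB colors N m d).length = N + 1
    ∧ ∀ k, k < N + 1 → (pvPassB colors N m d).getD k 0 = pvWS c m (pvF d) k := by
  obtain ⟨h1, _, h3⟩ := passB_foldl_spec hc hc1 hm d hlen (N / m) le_rfl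
  refine ⟨h1, fun k hk => ?_⟩
  rw [pvPassB, h3 k hk, pvWSp_full _ (Nat.div_le_div_right (by omega))]

-- ---- one whole m-step of A equals one whole m-step of B ----
lemma pass_eq {colors : Int} {c m N : Nat} (hc : colors = (c : Int)) (hc1 : 1 ≤ c)
    (hm : 1 ≤ m) (hmN : m ≤ N) (d : List Int) (hlen : d.length = N + 1) :
    (List.range colors.toNat).foldl (fun d' _ => pvPassA m d') d = pvPassB colors N m d := by
  have hcn : colors.toNat = c := by rw [hc]; exact Int.toNat_natCast c
  obtain ⟨a1, a2⟩ := passA_iter_spec hm c d (by omega)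
  obtain ⟨b1, b2⟩ := pvPassB_spec hc hc1 hm d hlen
  rw [hcn]
  refine List.ext_getElem (by rw [a1, b1, hlen]) fun i h1 h2 => ?_
  have hi : i < N + 1 := by rw [b1] at h2; exact h2
  rw [← List.getD_eq_getElem _ 0 h1, ← List.getD_eq_getElem _ 0 h2,
      a2 i (by omega), b2 i hi]

-- ---- the outer loops agree ----
lemma outer_eq {colors : Int} {c N : Nat} (hc : colors = (c : Int)) (hc1 : 1 ≤ c) :
    ∀ (ms : List Nat) (d : List Int), (∀ m ∈ ms, 1 ≤ m ∧ m ≤ N) → d.length = N + 1 →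
      ms.foldl (fun d' m => (List.range colors.toNat).foldl (fun d'' _ => pvPassA m d'') d') d
        = ms.foldl (fun d' m => pvPassB colors N m d') d := by
  intro ms
  induction ms with
  | nil => intro d _ _; rfl
  | cons m ms ih =>
    intro d hms hlen
    obtain ⟨hm1, hm2⟩ := hms m List.mem_cons_self
    rw [List.foldl_cons, List.foldl_cons,
        pass_eq hc hc1 hm1 hm2 d hlen]
    exact ih _ (fun m' hm' => hms m' (List.mem_cons_of_mem _ hm'))
      (pvPassB_spec hc hc1 hm1 d hlen).1

-- a fold whose step ignores the accumulator position returns the start value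
lemma pvFoldl_id (l : List Nat) (d : List Int) : l.foldl (fun a (_ : Nat) => a) d = d := by
  induction l with
  | nil => rfl
  | cons x l ih => rw [List.foldl_cons]; exact ih

-- ===== VERDICT (by name: the statement is the Claim_ definition above) =====
theorem colored_partition_dim_spec : Claim_equal_colored_partition_dim := by
  intro n colors _
  show colored_partition_dim n colors = colored_partition_dim_alt n colors
  unfold colored_partition_dim colored_partition_dim_alt
  by_cases h1 : n < 0
  · rw [if_pos h1, if_pos h1]
  · by_cases h2 : n = 0
    · rw [if_neg h1, if_neg h1, if_pos h2, if_pos h2]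
    · rw [if_neg h1, if_neg h1, if_neg h2, if_neg h2]
      have hN1 : 1 ≤ n.toNat := by omega
      by_cases h3 : colors ≤ 0
      · rw [if_pos h3]
        have hc0 : colors.toNat = 0 := Int.toNat_of_nonpos h3
        simp only [hc0, List.range_zero, List.foldl_nil]
        rw [pvFoldl_id]
        rw [pvGetD_set_ne (by omega)]
        rw [List.getD_eq_getElem _ _ (by simp), List.getElem_replicate]
      · rw [if_neg h3]
        have hc1n : 1 ≤ colors.toNat := by omega
        have hc : colors = (colors.toNat : Int) := (Int.toNat_of_nonneg (by omega)).symm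
        have hd0 : (List.replicate (n.toNat + 1) (0 : Int)).set 0 1
            = (1 : Int) :: List.replicate n.toNat 0 := by
          rw [List.replicate_succ]
          rfl
        dsimp only
        rw [← hd0]
        exact congrArg (fun l => l.getD n.toNat 0)
          (outer_eq hc hc1n (N := n.toNat) (List.range' 1 n.toNat)
            ((List.replicate (n.toNat + 1) (0 : Int)).set 0 1)
            (fun m hm => by
              rw [List.mem_range'_1] at hm
              omega)
            (by simp))
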